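-- pv_equiv track=rewrite | github.com/Kier73/Generative-Memory | bindings-python/gmem/number_theory.py | divisor_sigma
-- ===== SOURCE A (Python) =====
-- import math
--
-- def divisor_sigma(n: int, k: int = 1) -> int:
--     """
--     Divisor sum function σₖ(n) = Σ_{d|n} d^k.
--
--     σ₀(n) = number of divisors
--     σ₁(n) = sum of divisors
--     """
--     if n <= 0:
--         return 0
--     total = 0
--     for d in range(1, int(math.isqrt(n)) + 1):
--         if n % d == 0:
--             total += d ** k
--             if d != n // d:
--                 total += (n // d) ** k
--     return total
-- ===== SOURCE B (Python) =====
-- def divisor_sigma(n: int, k: int = 1) -> int: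
--     """Divisor power sum sigma_k(n) via the prime-factorization product formula:
--     sigma_k(prod p^e) = prod over prime powers of sum(p**(i*k) for i in 0..e)."""
--     if n <= 0:
--         return 0
--     total = 1
--     m = n
--     p = 2
--     while p * p <= m:
--         if m % p == 0:
--             e = 0
--             while m % p == 0:
--                 m //= p
--                 e += 1
--             total *= sum(p ** (i * k) for i in range(e + 1))
--         p += 1
--     if m > 1:
--         total *= 1 + m ** k
--     return total
-- ===== Notes on version B (the rewrite author's own statement) =====
-- stated objective: alternative
-- what changed: Replaces A's sqrt(n)-pairing divisor scan with the prime-factorization product formula: trial-divide n into prime powers p^e and multiply the geometric sums sum(p**(i*k) for i in 0..e).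
-- outside the precondition, e.g. on divisor_sigma(10, -1): A returns 1.8, B returns 1.7999999999999998; on divisor_sigma(6, -1): A returns 2.0, B returns 2.0
import Mathlib
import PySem

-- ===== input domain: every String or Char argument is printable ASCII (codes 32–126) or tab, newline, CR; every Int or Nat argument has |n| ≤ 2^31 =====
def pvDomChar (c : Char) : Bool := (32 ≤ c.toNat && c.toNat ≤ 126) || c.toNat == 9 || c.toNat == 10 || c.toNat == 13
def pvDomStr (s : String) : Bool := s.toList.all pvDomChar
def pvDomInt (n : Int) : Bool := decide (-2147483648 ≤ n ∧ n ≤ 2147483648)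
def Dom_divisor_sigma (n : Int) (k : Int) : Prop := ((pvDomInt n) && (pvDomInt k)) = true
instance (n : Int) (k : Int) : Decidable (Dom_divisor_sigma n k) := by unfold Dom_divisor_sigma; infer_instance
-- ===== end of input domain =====

-- B replaces A's sqrt(n)-pairing divisor scan with the prime-factorization product formula
-- sigma_k(prod p^e) = prod of the geometric sums sum_{i<=e} p^(i*k) (a different algorithm, similar cost).

-- ===== PORT A =====
-- A: if n <= 0 return 0; loop d in range(1, isqrt(n)+1), on n % d == 0 add d**k and, if d != n//d, (n//d)**k.
def divisor_sigma (n : Int) (k : Int) : Int :=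
  if n ≤ 0 then 0
  else
    (PySem.List.pyRange 1 ((Nat.sqrt n.toNat : Int) + 1) 1).foldl
      (fun total d =>
        if PySem.Int.mod n d = 0 then
          let t := total + d ^ k.toNat
          if d ≠ PySem.Int.floordiv n d then t + (PySem.Int.floordiv n d) ^ k.toNat else t
        else total) 0

-- ===== PORT B =====
-- B's inner while loop: divide p out of m, counting the exponent in e.
-- The Nat `fuel` argument (always supplied large enough) only makes the recursion structural;
-- on every reachable state the computation is Source B's.
def stripLoop (fuel : Nat) (p m e : Int) : Int × Int :=
  match fuel with
  | 0 => (m, e)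
  | fuel + 1 =>
    if PySem.Int.mod m p = 0 then stripLoop fuel p (PySem.Int.floordiv m p) (e + 1)
    else (m, e)

-- B: sum(p ** (i * k) for i in range(e + 1)).
def geoSum (p k e : Int) : Int :=
  ((PySem.List.pyRange 0 (e + 1) 1).map (fun i => p ^ (i * k).toNat)).sum

-- B's outer while loop: trial division from p, multiplying the geometric sums into total;
-- again `fuel` (always supplied large enough) only makes the recursion structural.
def sigLoop (fuel : Nat) (k m p total : Int) : Int :=
  match fuel with
  | 0 => if 1 < m then total * (1 + m ^ k.toNat) else total
  | fuel + 1 =>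
    if p * p ≤ m then
      if PySem.Int.mod m p = 0 then
        let r := stripLoop m.toNat p m 0
        sigLoop fuel k r.1 (p + 1) (total * geoSum p k r.2)
      else sigLoop fuel k m (p + 1) total
    else if 1 < m then total * (1 + m ^ k.toNat) else total

-- B: if n <= 0 return 0; else factor n from p = 2, multiplying the per-prime geometric sums.
def divisor_sigma_alt (n : Int) (k : Int) : Int :=
  if n ≤ 0 then 0 else sigLoop n.toNat k n 2 1

-- ===== PRECONDITION & SPEC =====
-- Pre_ excludes k < 0, where Python's d ** k / p ** (i*k) is a float, so neither program returns a value of the declared int type.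
def Pre_divisor_sigma (n : Int) (k : Int) : Prop := 0 ≤ k
instance (n : Int) (k : Int) : Decidable (Pre_divisor_sigma n k) := by unfold Pre_divisor_sigma; infer_instance
def pvWitness_divisor_sigma : Int × Int := (12, 2)

def Spec_divisor_sigma (n : Int) (k : Int) (out : Int) : Prop := out = divisor_sigma_alt n k
instance (n : Int) (k : Int) (out : Int) : Decidable (Spec_divisor_sigma n k out) := by unfold Spec_divisor_sigma; infer_instance

-- ===== CLAIM (what is proved, stated in full; the proofs are below) =====
def Claim_equal_divisor_sigma : Prop := ∀ (n : Int) (k : Int), Dom_divisor_sigma n k → Pre_divisor_sigma n k → Spec_divisor_sigma n k (divisor_sigma n k)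

-- ===== LEMMAS AND PROOFS =====

-- A small divisor d ≤ √N distinct from its cofactor has its cofactor above √N.
lemma cofactor_gt_sqrt {N d : Nat} (h : 0 < N) (hd : d ∣ N)
    (hds : d ≤ Nat.sqrt N) (hne : d ≠ N / d) : Nat.sqrt N < N / d := by
  by_contra hle
  push_neg at hle
  have hmul : d * (N / d) = N := Nat.mul_div_cancel' hd
  have hs0 : 0 < Nat.sqrt N := Nat.sqrt_pos.mpr h
  have hNle : N ≤ Nat.sqrt N * Nat.sqrt N := by
    calc N = d * (N / d) := hmul.symm
    _ ≤ Nat.sqrt N * Nat.sqrt N := Nat.mul_le_mul hds hle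
  have hEq : N = Nat.sqrt N * Nat.sqrt N :=
    le_antisymm hNle (by have := Nat.sqrt_le' N; rwa [pow_two] at this)
  have h1 : Nat.sqrt N ≤ d := by
    have : Nat.sqrt N * Nat.sqrt N ≤ d * Nat.sqrt N := by
      calc Nat.sqrt N * Nat.sqrt N = d * (N / d) := by rw [← hEq, hmul]
      _ ≤ d * Nat.sqrt N := Nat.mul_le_mul_left d hle
    exact Nat.le_of_mul_le_mul_right this hs0
  have h2 : Nat.sqrt N ≤ N / d := by
    have : Nat.sqrt N * Nat.sqrt N ≤ Nat.sqrt N * (N / d) := by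
      calc Nat.sqrt N * Nat.sqrt N = d * (N / d) := by rw [← hEq, hmul]
      _ ≤ Nat.sqrt N * (N / d) := Nat.mul_le_mul_right _ hds
    exact Nat.le_of_mul_le_mul_left this hs0
  exact hne (by omega)

-- A divisor above √N has its cofactor at most √N.
lemma cofactor_le_sqrt {N d : Nat} (h : 0 < N) (hd : d ∣ N)
    (hgt : Nat.sqrt N < d) : N / d ≤ Nat.sqrt N := by
  by_contra hlt
  push_neg at hlt
  have hmul : d * (N / d) = N := Nat.mul_div_cancel' hd
  have : (Nat.sqrt N + 1) * (Nat.sqrt N + 1) ≤ N := by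
    calc (Nat.sqrt N + 1) * (Nat.sqrt N + 1) ≤ d * (N / d) := Nat.mul_le_mul hgt hlt
    _ = N := hmul
  have h2 := Nat.lt_succ_sqrt N
  simp only [Nat.succ_eq_add_one] at h2
  omega

-- The √N-pairing sum (A's loop) equals the full divisor scan, Nat-indexed.
lemma sigma_pair_sum (N K : Nat) (h : 0 < N) :
    ∑ d ∈ Finset.Ioc 0 (Nat.sqrt N),
      (if d ∣ N then ((d : Int))^K + (if d ≠ N / d then ((N / d : Nat) : Int)^K else 0) else 0)
    = ∑ d ∈ Finset.Ioc 0 N, (if d ∣ N then ((d : Int))^K else 0) := by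
  rw [← Finset.sum_filter, ← Finset.sum_filter]
  have hD1 : (Finset.Ioc 0 (Nat.sqrt N)).filter (· ∣ N)
      = ((Finset.Ioc 0 N).filter (· ∣ N)).filter (· ≤ Nat.sqrt N) := by
    ext d
    simp only [Finset.mem_filter, Finset.mem_Ioc]
    constructor
    · rintro ⟨⟨h0, hs⟩, hd⟩
      exact ⟨⟨⟨h0, Nat.le_of_dvd h hd⟩, hd⟩, hs⟩
    · rintro ⟨⟨⟨h0, _⟩, hd⟩, hs⟩
      exact ⟨⟨h0, hs⟩, hd⟩
  rw [hD1, Finset.sum_add_distrib, ← Finset.sum_filter_add_sum_filter_not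
        ((Finset.Ioc 0 N).filter (· ∣ N)) (· ≤ Nat.sqrt N) (fun d => ((d:Int))^K)]
  congr 1
  rw [← Finset.sum_filter]
  refine Finset.sum_nbij' (i := fun d => N / d) (j := fun d => N / d) ?_ ?_ ?_ ?_ ?_
  · intro d hd
    simp only [Finset.mem_filter, Finset.mem_Ioc] at hd ⊢
    obtain ⟨⟨⟨⟨h0, hN⟩, hdvd⟩, hs⟩, hne⟩ := hd
    have hgt := cofactor_gt_sqrt h hdvd hs hne
    refine ⟨⟨⟨?_, Nat.div_le_self N d⟩, Nat.div_dvd_of_dvd hdvd⟩, by omega⟩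
    exact Nat.div_pos (Nat.le_of_dvd h hdvd) h0
  · intro d hd
    simp only [Finset.mem_filter, Finset.mem_Ioc, not_le] at hd ⊢
    obtain ⟨⟨⟨h0, hN⟩, hdvd⟩, hs⟩ := hd
    have hle := cofactor_le_sqrt h hdvd hs
    have hdd : N / (N / d) = d := Nat.div_div_self hdvd h.ne'
    refine ⟨⟨⟨⟨?_, Nat.div_le_self N d⟩, Nat.div_dvd_of_dvd hdvd⟩, hle⟩, by omega⟩
    exact Nat.div_pos (Nat.le_of_dvd h hdvd) h0
  · intro d hd
    simp only [Finset.mem_filter, Finset.mem_Ioc] at hd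
    exact Nat.div_div_self hd.1.1.2 h.ne'
  · intro d hd
    simp only [Finset.mem_filter, Finset.mem_Ioc] at hd
    exact Nat.div_div_self hd.1.2 h.ne'
  · intro d hd
    rfl

-- range(1, m+1) loop body, summed, is a Finset.Ioc sum.
lemma sum_pyRange_body (F : Int → Int) (m : Nat) :
    ((PySem.List.pyRange 1 ((m : Int) + 1) 1).map F).sum = ∑ d ∈ Finset.Ioc 0 m, F (d : Int) := by
  rw [PySem.List.pyRange_one]
  have hm : (((m : Int) + 1) - 1).toNat = m := by omega
  rw [hm, List.map_map]
  have h1 : ((List.range m).map (F ∘ fun k : Nat => (1 : Int) + ↑k)).sum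
      = ∑ j ∈ Finset.range m, F (1 + (j : Int)) := rfl
  rw [h1]
  have h2 : Finset.Ioc 0 m = Finset.Ico 1 (m + 1) := by ext x; simp; omega
  rw [h2, Finset.sum_Ico_eq_sum_range]
  simp only [Nat.add_sub_cancel]
  refine Finset.sum_congr rfl fun j _ => by push_cast; ring_nf

-- A's loop is the √N-pairing sum.
lemma a_eq_sum (N : Nat) (k : Int) (h : 0 < N) :
    divisor_sigma (N : Int) k
      = ∑ d ∈ Finset.Ioc 0 (Nat.sqrt N),
          (if d ∣ N then ((d : Int))^k.toNat
             + (if d ≠ N / d then ((N / d : Nat) : Int)^k.toNat else 0) else 0) := by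
  unfold divisor_sigma
  rw [if_neg (by exact_mod_cast Nat.not_le.mpr h)]
  have htn : ((N : Int)).toNat = N := by omega
  rw [htn]
  have hfun : (fun (total d : Int) =>
        if PySem.Int.mod (N : Int) d = 0 then
          let t := total + d ^ k.toNat
          if d ≠ PySem.Int.floordiv (N : Int) d then t + (PySem.Int.floordiv (N : Int) d) ^ k.toNat else t
        else total)
      = fun total d => total + (if PySem.Int.mod (N : Int) d = 0 then
          d ^ k.toNat + (if d ≠ PySem.Int.floordiv (N : Int) d then (PySem.Int.floordiv (N : Int) d) ^ k.toNat else 0) else 0) := by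
    funext t d
    by_cases h1 : PySem.Int.mod (N : Int) d = 0 <;> simp [h1] <;> split_ifs <;> ring
  rw [hfun, PySem.List.foldl_add, zero_add, sum_pyRange_body]
  refine Finset.sum_congr rfl fun d hd => ?_
  simp only [Finset.mem_Ioc] at hd
  have hmod : PySem.Int.mod (N : Int) (d : Int) = ((N % d : Nat) : Int) := by simp
  have hfd : PySem.Int.floordiv (N : Int) (d : Int) = ((N / d : Nat) : Int) := by simp
  rw [hmod, hfd]
  have hne : ((d : Int) ≠ ((N / d : Nat) : Int)) ↔ d ≠ N / d := by exact_mod_cast Iff.rfl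
  by_cases hdvd : d ∣ N
  · rw [if_pos (by exact_mod_cast (Nat.mod_eq_zero_of_dvd hdvd)), if_pos hdvd]
    congr 1
    split_ifs with h1 h2 h2 <;> first | rfl | (exact absurd (hne.mp h1) h2) | (exact absurd (hne.mpr h2) h1)
  · rw [if_neg (by exact_mod_cast fun hc => hdvd (Nat.dvd_of_mod_eq_zero (by exact_mod_cast hc))), if_neg hdvd]

-- The full divisor scan is the divisor sum over N.divisors, cast to Int.
lemma Ioc_sum_eq_divisors (N K : Nat) (h : 0 < N) :
    ∑ d ∈ Finset.Ioc 0 N, (if d ∣ N then ((d : Int))^K else 0)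
      = ((∑ d ∈ N.divisors, d ^ K : Nat) : Int) := by
  rw [← Finset.sum_filter]
  have hfil : (Finset.Ioc 0 N).filter (· ∣ N) = N.divisors := by
    ext d
    simp only [Finset.mem_filter, Finset.mem_Ioc, Nat.mem_divisors]
    constructor
    · rintro ⟨⟨h0, hN⟩, hd⟩
      exact ⟨hd, h.ne'⟩
    · rintro ⟨hd, -⟩
      exact ⟨⟨Nat.pos_of_dvd_of_pos hd h, Nat.le_of_dvd h hd⟩, hd⟩
  rw [hfil]
  push_cast
  rfl

-- Characterisation of B's inner while loop: it splits m = p^E * m' with p not dividing m'.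
lemma stripLoop_spec (P : Nat) (hP : 2 ≤ P) :
    ∀ (fuel M : Nat), M ≤ fuel → 0 < M → ∀ e : Int, ∃ (E M' : Nat),
      stripLoop fuel (P : Int) (M : Int) e = ((M' : Int), e + (E : Int))
        ∧ M = P ^ E * M' ∧ ¬ P ∣ M' ∧ 0 < M' := by
  intro fuel
  induction fuel with
  | zero => intro M hf hM e; omega
  | succ fuel ih =>
    intro M hf hM e
    rw [stripLoop]
    by_cases hdvd : P ∣ M
    · rw [if_pos (by rw [PySem.Int.mod_eq_zero_iff_dvd]; exact_mod_cast hdvd)]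
      have hdiv : PySem.Int.floordiv (M : Int) (P : Int) = ((M / P : Nat) : Int) := by simp
      have hlt : M / P < M := Nat.div_lt_self hM hP
      have hpos : 0 < M / P := Nat.div_pos (Nat.le_of_dvd hM hdvd) (by omega)
      obtain ⟨E, M', heq, hfac, hnd, hM'⟩ := ih (M / P) (by omega) hpos (e + 1)
      rw [hdiv]
      refine ⟨E + 1, M', ?_, ?_, hnd, hM'⟩
      · rw [heq]; congr 1; push_cast; ring
      · rw [pow_succ, mul_assoc, mul_comm (P:Nat) _, ← mul_assoc, ← hfac,
          Nat.div_mul_cancel hdvd]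
    · rw [if_neg (by
        rw [PySem.Int.mod_eq_zero_iff_dvd]
        exact fun hc => hdvd (by exact_mod_cast hc))]
      exact ⟨0, M, by simp, by simp, hdvd, hM⟩

-- Source B's geometric sum, on cast arguments, as a Nat sum.
lemma geoSum_natCast (P : Nat) (k : Int) (hk : 0 ≤ k) (E : Nat) :
    geoSum (P : Int) k (E : Int)
      = ((∑ i ∈ Finset.range (E + 1), P ^ (i * k.toNat) : Nat) : Int) := by
  unfold geoSum
  rw [PySem.List.pyRange_one]
  have hE : (((E : Int) + 1) - 0).toNat = E + 1 := by omega
  rw [hE, List.map_map]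
  have h1 : ((List.range (E+1)).map ((fun i : Int => (P:Int) ^ (i * k).toNat) ∘ fun j : Nat => (0 : Int) + ↑j)).sum
      = ∑ j ∈ Finset.range (E+1), (P:Int) ^ (((j : Int)) * k).toNat := by
    refine congrArg _ (List.map_congr_left fun j _ => ?_)
    simp
  rw [h1]
  push_cast
  refine Finset.sum_congr rfl fun j _ => ?_
  congr 1
  conv_lhs => rw [← Int.toNat_of_nonneg hk]
  rw [← Int.natCast_mul, Int.toNat_natCast]

-- P itself is prime when it divides M and M has no prime factor below P.
lemma dvd_min_prime (P M : Nat) (hP : 2 ≤ P) (hM : 0 < M) (hdvd : P ∣ M)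
    (hfac : ∀ q : Nat, q.Prime → q ∣ M → P ≤ q) : P.Prime := by
  have h1 := Nat.minFac_prime (show P ≠ 1 by omega)
  have h2 : P.minFac ∣ M := (Nat.minFac_dvd P).trans hdvd
  have h3 := hfac _ h1 h2
  have h4 := Nat.minFac_le (show 0 < P by omega)
  have : P.minFac = P := le_antisymm h4 h3
  exact this ▸ h1

-- Exit branch of B's outer loop: if m has no factor below p and p*p > m, it is 1 or prime.
lemma sigExit_eq (k : Int) (M P : Nat) (t : Int) (hM : 0 < M) (hP : 2 ≤ P)
    (hpp : ¬ P * P ≤ M) (hfac : ∀ q : Nat, q.Prime → q ∣ M → P ≤ q) :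
    (if 1 < (M : Int) then t * (1 + (M : Int) ^ k.toNat) else t)
      = t * ((∑ d ∈ M.divisors, d ^ k.toNat : Nat) : Int) := by
  rcases Nat.lt_or_ge 1 M with h1 | h1
  · rw [if_pos (by exact_mod_cast h1)]
    have hprime : M.Prime := by
      by_contra hnp
      have hsq := Nat.minFac_sq_le_self (by omega) hnp
      have hq := Nat.minFac_prime (show M ≠ 1 by omega)
      have := hfac _ hq (Nat.minFac_dvd M)
      nlinarith [hsq]
    rw [hprime.divisors]
    rw [Finset.sum_insert (by simp; omega), Finset.sum_singleton]
    push_cast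
    ring
  · rw [if_neg (by exact_mod_cast Nat.not_lt.mpr h1)]
    have : M = 1 := by omega
    subst this
    simp [Nat.divisors_one]

-- Invariant of B's outer loop: once m has no prime factor below p, it contributes total * σ_K(m).
lemma sigLoop_inv (k : Int) (hk : 0 ≤ k) :
    ∀ (fuel M P : Nat) (t : Int), M + 1 ≤ P + fuel → 0 < M → 2 ≤ P →
      (∀ q : Nat, q.Prime → q ∣ M → P ≤ q) →
      sigLoop fuel k (M : Int) (P : Int) t = t * ((∑ d ∈ M.divisors, d ^ k.toNat : Nat) : Int) := by
  intro fuel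
  induction fuel with
  | zero =>
    intro M P t hf hM hP hfac
    rw [sigLoop]
    exact sigExit_eq k M P t hM hP (by nlinarith) hfac
  | succ fuel ih =>
    intro M P t hf hM hP hfac
    rw [sigLoop]
    by_cases hpp : P * P ≤ M
    · rw [if_pos (by exact_mod_cast hpp)]
      have hpm : P ≤ M := le_trans (Nat.le_mul_of_pos_left P (by omega)) hpp
      by_cases hdvd : P ∣ M
      · rw [if_pos (by rw [PySem.Int.mod_eq_zero_iff_dvd]; exact_mod_cast hdvd)]
        have htn : ((M : Int)).toNat = M := by omega
        rw [htn]
        obtain ⟨E, M', heq, hfacM, hnd, hM'⟩ := stripLoop_spec P hP M M (le_refl M) hM 0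
        show sigLoop fuel k (stripLoop M (P:Int) (M:Int) 0).1 ((P:Int) + 1)
            (t * geoSum (P:Int) k (stripLoop M (P:Int) (M:Int) 0).2) = _
        rw [heq]
        simp only [zero_add]
        have hE : 1 ≤ E := by
          rcases Nat.eq_zero_or_pos E with h0 | h
          · subst h0; simp at hfacM; exact absurd (hfacM ▸ hdvd) hnd
          · exact h
        have hM'leM : M' ≤ M := Nat.le_of_dvd hM ⟨P ^ E, by rw [hfacM]; ring⟩
        have hfac' : ∀ q : Nat, q.Prime → q ∣ M' → P + 1 ≤ q := by
          intro q hq hqd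
          have hqM : q ∣ M := dvd_trans hqd ⟨P ^ E, by rw [hfacM]; ring⟩
          have := hfac q hq hqM
          rcases Nat.lt_or_ge P q with h | h
          · omega
          · have hqP : q = P := by omega
            exact absurd (hqP ▸ hqd) hnd
        have hrec := ih M' (P + 1) (t * geoSum (P : Int) k (E : Int)) (by omega) hM' (by omega) hfac'
        push_cast at hrec
        rw [hrec, geoSum_natCast P k hk E]
        have hPprime : P.Prime := dvd_min_prime P M hP hM hdvd hfac
        have hcop : (P ^ E).Coprime M' :=
          Nat.Coprime.pow_left E ((Nat.Prime.coprime_iff_not_dvd hPprime).mpr hnd)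
        have hmul : (∑ d ∈ M.divisors, d ^ k.toNat)
            = (∑ d ∈ (P ^ E).divisors, d ^ k.toNat) * (∑ d ∈ M'.divisors, d ^ k.toNat) := by
          have hs := (ArithmeticFunction.isMultiplicative_sigma (k := k.toNat)).map_mul_of_coprime hcop
          simpa [ArithmeticFunction.sigma_apply, hfacM] using hs
        have hpowsum : (∑ d ∈ (P ^ E).divisors, d ^ k.toNat)
            = ∑ i ∈ Finset.range (E + 1), P ^ (i * k.toNat) := by
          rw [Nat.sum_divisors_prime_pow hPprime]
          exact Finset.sum_congr rfl fun i _ => by rw [← pow_mul]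
        rw [hmul, hpowsum]
        push_cast
        ring
      · rw [if_neg (by
          rw [PySem.Int.mod_eq_zero_iff_dvd]
          exact fun hc => hdvd (by exact_mod_cast hc))]
        have hfac' : ∀ q : Nat, q.Prime → q ∣ M → P + 1 ≤ q := by
          intro q hq hqd
          have := hfac q hq hqd
          rcases Nat.lt_or_ge P q with h | h
          · omega
          · have hqP : q = P := by omega
            exact absurd (hqP ▸ hqd) hdvd
        have := ih M (P + 1) t (by omega) hM (by omega) hfac'
        push_cast at this ⊢
        exact this
    · rw [if_neg (by exact_mod_cast hpp)]
      exact sigExit_eq k M P t hM hP hpp hfac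

-- B equals the divisor sum.
lemma alt_eq_sum (N : Nat) (k : Int) (hk : 0 ≤ k) (h : 0 < N) :
    divisor_sigma_alt (N : Int) k = ((∑ d ∈ N.divisors, d ^ k.toNat : Nat) : Int) := by
  unfold divisor_sigma_alt
  rw [if_neg (by exact_mod_cast Nat.not_le.mpr h)]
  have htn : ((N : Int)).toNat = N := by omega
  rw [htn]
  have h2 : ((2 : Nat) : Int) = (2 : Int) := by norm_num
  have := sigLoop_inv k hk N N 2 1 (by omega) h (le_refl 2) (fun q hq _ => hq.two_le)
  rw [h2] at this
  rw [this, one_mul]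

-- ===== VERDICT (by name: the statement is the Claim_ definition above) =====
theorem divisor_sigma_spec : Claim_equal_divisor_sigma := by
  intro n k _ hk
  unfold Spec_divisor_sigma
  by_cases hn : n ≤ 0
  · simp [divisor_sigma, divisor_sigma_alt, hn]
  · push_neg at hn
    obtain ⟨N, rfl⟩ : ∃ N : Nat, n = (N : Int) := ⟨n.toNat, (Int.toNat_of_nonneg hn.le).symm⟩
    have hN : 0 < N := by exact_mod_cast hn
    rw [a_eq_sum N k hN, alt_eq_sum N k hk hN, sigma_pair_sum N k.toNat hN,
      Ioc_sum_eq_divisors N k.toNat hN]
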